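-- pv_equiv track=rewrite | github.com/ColinC101/INISAT_COM | main.py | macDecoder
-- ===== SOURCE A (Python) =====
-- def macDecoder(macAddr):
--     """
--     Decode the MAC address returned by WiFi module,
--     as encoding is not standard.
--
--         Returns:
--             decodedAddr (str): The decoded MAC address
--     """
--     pos = 0
--     decodedAddr = ""
--     while pos < len(macAddr):
--         if macAddr[pos] == "\\":
--             pos += 1
--         elif macAddr[pos] == "x":
--             decodedAddr = decodedAddr + macAddr[pos+1:pos+3] + ":"
--             pos += 3
--         else:
--             decodedAddr = decodedAddr + "??:"
--             pos += 1
--     return decodedAddr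
-- ===== SOURCE B (Python) =====
-- def macDecoder(macAddr):
--     """
--     Decode the MAC address returned by WiFi module,
--     as encoding is not standard.
--
--         Returns:
--             decodedAddr (str): The decoded MAC address
--     """
--     # Consume the string through an iterator (no index arithmetic),
--     # collect the emitted pieces and join them once.
--     it = iter(macAddr)
--     pieces = []
--     for c in it:
--         if c == "\\":
--             continue
--         if c == "x":
--             a = next(it, "")
--             b = next(it, "")
--             pieces.append(a + b + ":")
--         else:
--             pieces.append("??:")
--     return "".join(pieces)
-- ===== Notes on version B (the rewrite author's own statement) =====
-- stated objective: faster
-- what changed: Replaces the index-pointer while-loop with quadratic string concatenation by iterator consumption (for-loop pulling extra chars with next) that collects pieces in a list and joins them once.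
import Mathlib
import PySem

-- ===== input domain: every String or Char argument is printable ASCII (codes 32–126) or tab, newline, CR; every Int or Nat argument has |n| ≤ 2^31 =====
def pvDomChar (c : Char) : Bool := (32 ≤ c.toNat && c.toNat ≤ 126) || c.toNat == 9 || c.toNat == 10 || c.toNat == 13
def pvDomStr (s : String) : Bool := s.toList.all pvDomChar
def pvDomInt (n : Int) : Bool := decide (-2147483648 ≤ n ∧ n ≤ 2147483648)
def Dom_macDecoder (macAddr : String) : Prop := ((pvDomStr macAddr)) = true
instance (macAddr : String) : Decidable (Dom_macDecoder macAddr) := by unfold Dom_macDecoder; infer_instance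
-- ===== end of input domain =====

-- B replaces A's index-pointer while-loop with quadratic string accumulation by
-- iterator consumption collecting pieces joined once (objective: faster, measured).

-- ===== PORT A =====
-- A's while-loop over the position pointer; macAddr[pos+1:pos+3] is PySem.List.slice
-- on the character list (exact: Python's clamping slice).
def macDecoderLoop (cs : List Char) (pos : Nat) (acc : String) : String :=
  if h : pos < cs.length then
    if cs[pos] = '\\' then
      macDecoderLoop cs (pos + 1) acc
    else if cs[pos] = 'x' then
      macDecoderLoop cs (pos + 3)
        (acc ++ String.ofList (PySem.List.slice cs (some ((pos : Int) + 1)) (some ((pos : Int) + 3))) ++ ":")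
    else
      macDecoderLoop cs (pos + 1) (acc ++ "??:")
  else acc
termination_by cs.length - pos

def macDecoder (macAddr : String) : String :=
  macDecoderLoop macAddr.toList 0 ""

-- ===== PORT B =====
-- B's for-loop over the character iterator: each step consumes the head (and, after
-- an 'x', up to two further characters via next(it, "")), emitting one piece.
def macPieces (cs : List Char) : List String :=
  match cs with
  | [] => []
  | c :: r =>
    if c = '\\' then macPieces r
    else if c = 'x' then
      (String.ofList (r.take 1) ++ String.ofList ((r.drop 1).take 1) ++ ":") :: macPieces (r.drop 2)
    else "??:" :: macPieces r
termination_by cs.length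
decreasing_by all_goals simp

-- "".join(pieces)
def macDecoder_alt (macAddr : String) : String :=
  String.join (macPieces macAddr.toList)

-- ===== PRECONDITION & SPEC =====
def Spec_macDecoder (macAddr : String) (out : String) : Prop := out = macDecoder_alt macAddr
instance (macAddr : String) (out : String) : Decidable (Spec_macDecoder macAddr out) := by unfold Spec_macDecoder; infer_instance

-- ===== CLAIM (what is proved, stated in full; the proofs are below) =====
def Claim_equal_macDecoder : Prop := ∀ (macAddr : String), Dom_macDecoder macAddr → Spec_macDecoder macAddr (macDecoder macAddr)

-- ===== LEMMAS AND PROOFS =====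

theorem pv_foldl_append (l : List String) (a : String) :
    l.foldl (fun r s => r ++ s) a = a ++ l.foldl (fun r s => r ++ s) "" := by
  induction l generalizing a with
  | nil => simp [List.foldl]
  | cons x xs ih =>
      simp only [List.foldl]
      rw [ih (a ++ x), ih ("" ++ x), String.empty_append, String.append_assoc]

theorem pv_join_cons (s : String) (l : List String) :
    String.join (s :: l) = s ++ String.join l := by
  show List.foldl _ "" (s :: l) = _
  simp only [List.foldl, String.empty_append]
  exact pv_foldl_append l s

theorem pv_take_two (r : List Char) :
    String.ofList (r.take 2) = String.ofList (r.take 1) ++ String.ofList ((r.drop 1).take 1) := by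
  rw [← String.ofList_append, ← List.take_add]

theorem pv_loop_eq (cs : List Char) (pos : Nat) (acc : String) :
    macDecoderLoop cs pos acc = acc ++ String.join (macPieces (cs.drop pos)) := by
  fun_induction macDecoderLoop cs pos acc with
  | case1 pos acc h hb ih =>
      rw [ih, List.drop_eq_getElem_cons h]
      simp [macPieces, hb]
  | case2 pos acc h hb hx ih =>
      rw [ih, List.drop_eq_getElem_cons h]
      simp only [macPieces]
      rw [if_neg hb, if_pos hx, pv_join_cons]
      have h1 : ((pos : Int) + 1) = ((pos + 1 : Nat) : Int) := by push_cast; ring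
      have h3 : ((pos : Int) + 3) = ((pos + 3 : Nat) : Int) := by push_cast; ring
      rw [h1, h3, PySem.List.slice_natCast]
      have ht : pos + 3 - (pos + 1) = 2 := by omega
      have hdd : (cs.drop (pos + 1)).drop 2 = cs.drop (pos + 3) := by
        rw [List.drop_drop]
      rw [ht, hdd, pv_take_two]
      simp [String.append_assoc]
  | case3 pos acc h hb hx ih =>
      rw [ih, List.drop_eq_getElem_cons h]
      simp only [macPieces]
      rw [if_neg hb, if_neg hx, pv_join_cons, String.append_assoc]
  | case4 pos acc h =>
      rw [List.drop_eq_nil_iff.mpr (by omega)]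
      simp [macPieces, String.join]

-- ===== VERDICT (by name: the statement is the Claim_ definition above) =====
theorem macDecoder_spec : Claim_equal_macDecoder := by
  intro s _
  unfold Spec_macDecoder macDecoder macDecoder_alt
  simpa using pv_loop_eq s.toList 0 ""
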